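-- pv_equiv track=rewrite | github.com/danielhgasparin/algorithms-python | algorithms/steps.py | steps_loop
-- ===== SOURCE A (Python) =====
-- def steps_loop(n):
--     """Return a list of "n" progression steps, using loops."""
--     result = []
--     for i in range(n):
--         line = ""
--         for j in range(n):
--             line += "#" if j <= i else " "
--         result.append(line)
--     return result
-- ===== SOURCE B (Python) =====
-- def steps_loop(n):
--     """Return a list of "n" progression steps, using loops."""
--     result = []
--     line = [" "] * n
--     for i in range(n):
--         line[i] = "#"
--         result.append("".join(line))
--     return result
-- ===== Notes on version B (the rewrite author's own statement) =====
-- stated objective: faster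
-- what changed: Instead of rebuilding every row character by character in a nested loop, B keeps one mutable row buffer initialised to n blanks, sets cell i to '#' in each iteration and snapshots the buffer with a single join, removing the per-row string reconstruction.
import Mathlib
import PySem

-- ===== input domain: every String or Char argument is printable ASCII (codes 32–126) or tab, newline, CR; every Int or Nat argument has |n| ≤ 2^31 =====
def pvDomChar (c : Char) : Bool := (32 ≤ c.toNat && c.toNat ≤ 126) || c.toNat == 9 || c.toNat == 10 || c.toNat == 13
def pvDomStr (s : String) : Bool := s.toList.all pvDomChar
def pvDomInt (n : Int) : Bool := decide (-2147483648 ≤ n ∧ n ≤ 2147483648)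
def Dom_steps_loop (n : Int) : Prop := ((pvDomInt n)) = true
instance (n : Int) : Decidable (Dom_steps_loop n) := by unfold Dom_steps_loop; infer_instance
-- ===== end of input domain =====

-- B replaces A's nested row-rebuilding loops by a single pass that mutates one shared
-- row buffer (set cell i to '#', snapshot it); measurably faster by a constant factor.

-- ===== PORT A =====
-- A: for i in range(n): build line char by char over j in range(n), append it.
-- (the string `line` is ported as a List Char; `line += c` is `++ [c]`, the final
--  `result.append(line)` wraps it with String.ofList — exact for building a string)
def steps_loop (n : Int) : List String :=
  (PySem.List.pyRange 0 n 1).foldl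
    (fun result i =>
      result ++ [String.ofList
        ((PySem.List.pyRange 0 n 1).foldl
          (fun line j => line ++ [if j ≤ i then '#' else ' ']) [])])
    []

-- ===== PORT B =====
-- B: line = [" "] * n (a buffer of single chars, ported as List Char — exact since every
-- element is one char); for i in range(n): line[i] = "#" (pySetD, i always in range),
-- append "".join(line) (join of single-char strings = String.ofList of the buffer — exact).
def steps_loop_alt (n : Int) : List String :=
  ((PySem.List.pyRange 0 n 1).foldl
    (fun (st : List Char × List String) i =>
      let line := PySem.List.pySetD st.1 i '#'
      (line, st.2 ++ [String.ofList line]))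
    (List.replicate n.toNat ' ', [])).2

-- ===== PRECONDITION & SPEC =====
-- A is total (range(n) is empty for n ≤ 0), so no Pre_ is needed.
def Spec_steps_loop (n : Int) (out : List String) : Prop := out = steps_loop_alt n
instance (n : Int) (out : List String) : Decidable (Spec_steps_loop n out) := by
  unfold Spec_steps_loop; infer_instance

-- ===== CLAIM (what is proved, stated in full; the proofs are below) =====
def Claim_equal_steps_loop : Prop := ∀ (n : Int), Dom_steps_loop n → Spec_steps_loop n (steps_loop n)

-- ===== LEMMAS AND PROOFS =====

-- row i of an n-step staircase: i+1 hashes then blanks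
def pvRow (m i : Nat) : List Char :=
  List.replicate (i+1) '#' ++ List.replicate (m-i-1) ' '

-- A's inner loop builds exactly row i
lemma rowA_eq (m i : Nat) (hi : i < m) :
    (List.range m).foldl (fun (line : List Char) (j : Nat) => line ++ [if (j:Int) ≤ (i:Int) then '#' else ' ']) []
    = pvRow m i := by
  rw [PySem.List.foldl_append_singleton_eq_map, List.nil_append]
  have hm : m = (i+1) + (m-i-1) := by omega
  rw [hm, List.range_add, List.map_append, pvRow]
  congr 1
  · have h1 : ∀ j ∈ List.range (i+1),
        (if (j:Int) ≤ (i:Int) then '#' else ' ') = '#' := by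
      intro j hj
      rw [if_pos]; exact_mod_cast Nat.lt_succ_iff.mp (List.mem_range.mp hj)
    rw [List.map_congr_left h1, List.map_const', List.length_range]
  · rw [List.map_map]
    have h2 : ∀ k ∈ List.range (m-i-1),
        ((fun (j : Nat) => if (j:Int) ≤ (i:Int) then '#' else ' ') ∘ (fun x => i+1+x)) k = ' ' := by
      intro k _
      simp only [Function.comp]
      rw [if_neg]; push_cast; omega
    rw [List.map_congr_left h2, List.map_const', List.length_range]
    rw [show i+1+(m-i-1)-i-1 = m-i-1 from by omega]

-- one step of B's buffer: planting '#' at index s turns row s-1 into row s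
lemma rowB_step (m s : Nat) (h : s < m) :
    (List.replicate s '#' ++ List.replicate (m-s) ' ').set s '#'
    = List.replicate (s+1) '#' ++ List.replicate (m-s-1) ' ' := by
  have hms : m - s = (m-s-1) + 1 := by omega
  rw [hms, List.replicate_succ]
  rw [List.set_append_right _ _ (by simp)]
  simp [List.replicate_succ']

-- B's loop invariant: after planting hashes at s, …, s+len-1 the snapshots are rows s … s+len-1
lemma bloop (m : Nat) : ∀ (len s : Nat) (acc : List String), s + len = m →
    (List.range' s len).foldl
      (fun (st : List Char × List String) k =>
        ((st.1.set k '#'), st.2 ++ [String.ofList (st.1.set k '#')]))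
      (List.replicate s '#' ++ List.replicate (m-s) ' ', acc)
    = (List.replicate m '#' ++ List.replicate (m-m) ' ',
       acc ++ (List.range' s len).map (fun i => String.ofList (pvRow m i))) := by
  intro len
  induction len with
  | zero => intro s acc h; simp [show s = m from by omega]
  | succ l ih =>
    intro s acc h
    rw [List.range'_succ, List.foldl_cons]
    simp only
    rw [rowB_step m s (by omega)]
    have := ih (s+1) (acc ++ [String.ofList (List.replicate (s+1) '#' ++ List.replicate (m-s-1) ' ')]) (by omega)
    rw [show m - (s+1) = m-s-1 from by omega] at this
    rw [this]
    simp [pvRow, List.map_cons]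

theorem steps_loop_eq_alt (n : Int) : steps_loop n = steps_loop_alt n := by
  unfold steps_loop steps_loop_alt
  rw [PySem.List.pyRange_one]
  simp only [Int.sub_zero, zero_add]
  set m := n.toNat with hm
  -- A side: the outer loop is a map; each row equals pvRow
  rw [PySem.List.foldl_append_singleton_eq_map, List.nil_append, List.map_map]
  have hA : ∀ k ∈ List.range m,
      ((fun (i : Int) => String.ofList
        (((List.range m).map (fun (k : Nat) => (k:Int))).foldl
          (fun line j => line ++ [if j ≤ i then '#' else ' ']) [])) ∘ fun (k : Nat) => (k:Int)) k
      = String.ofList (pvRow m k) := by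
    intro k hk
    simp only [Function.comp, List.foldl_map]
    rw [rowA_eq m k (List.mem_range.mp hk)]
  rw [List.map_congr_left hA]
  -- B side: the buffer loop produces the same rows
  rw [List.foldl_map]
  simp only [PySem.List.pySetD_natCast]
  have h0 : (List.replicate m ' ', ([] : List String))
      = (List.replicate 0 '#' ++ List.replicate (m-0) ' ', ([] : List String)) := by simp
  rw [h0, List.range_eq_range', bloop m m 0 [] (by omega)]
  simp

-- ===== VERDICT (by name: the statement is the Claim_ definition above) =====
theorem steps_loop_spec : Claim_equal_steps_loop := by
  intro n _
  unfold Spec_steps_loop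
  exact steps_loop_eq_alt n
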